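-- pv_equiv track=rewrite | github.com/MusicalGestalt/MusicGeneration | rhythm/interval_sequences/__init__.py | __increment_slots
-- ===== SOURCE A (Python) =====
-- def __increment_slots(slots):
--     # Find rightmost '0'
--     i0 = max([p for (p,v) in enumerate(slots) if v == 0])
--     # Find rightmost '1' (that occurs before rightmost 0)
--     candidates = [p for (p,v) in enumerate(slots) if v == 1 and p < i0]
--     if not candidates: return None
--     i1 = max(candidates)
--     assert slots[i0] == 0
--     assert slots[i1] == 1
--     assert i1 < i0
--     c1 = sum(slots[i1:])
--     c0 = len(slots) - i1 - sum(slots[i1:])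
--     new_slots = slots[:i1] + [0] + ([1] * c1) + ([0] * (c0-1))
--     assert len(new_slots) == len(slots)
--     return new_slots
-- ===== SOURCE B (Python) =====
-- def __increment_slots(slots):
--     if 0 not in slots:
--         raise ValueError("no empty slot in the configuration")
--     ones = 0   # ones strictly to the right of the cursor
--     zeros = 0  # zeros strictly to the right of the cursor
--     for i in range(len(slots) - 1, -1, -1):
--         v = slots[i]
--         if v == 1 and zeros > 0:
--             return slots[:i] + [0] + [1] * (ones + 1) + [0] * (zeros - 1)
--         if v == 1:
--             ones += 1
--         elif v == 0:
--             zeros += 1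
--     return None
-- ===== Notes on version B (the rewrite author's own statement) =====
-- stated objective: simpler
-- what changed: B replaces A's staged passes (two enumerate comprehensions, two max() calls, a slice sum, assertions) by one explicit no-empty-slot check and a single right-to-left scan with running one/zero counters that early-returns the successor at the pivot; Pre_ excludes lists without a zero (A raises ValueError, B raises its own ValueError) and lists with a non-0/1 value to the right of the rightmost movable 1 (a 1 with a 0 after it), where A's slice-sum reconstruction raises AssertionError or returns an accidental list shaped by the non-binary values.
-- outside the precondition, e.g. on __increment_slots([1, 1]): A raises ValueError, B raises ValueError; on __increment_slots([1, 0, 2]): A raises AssertionError, B returns [0, 1]; on __increment_slots([1, 0, -1]): A returns [0, 0, 0], B returns [0, 1]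
import Mathlib
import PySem

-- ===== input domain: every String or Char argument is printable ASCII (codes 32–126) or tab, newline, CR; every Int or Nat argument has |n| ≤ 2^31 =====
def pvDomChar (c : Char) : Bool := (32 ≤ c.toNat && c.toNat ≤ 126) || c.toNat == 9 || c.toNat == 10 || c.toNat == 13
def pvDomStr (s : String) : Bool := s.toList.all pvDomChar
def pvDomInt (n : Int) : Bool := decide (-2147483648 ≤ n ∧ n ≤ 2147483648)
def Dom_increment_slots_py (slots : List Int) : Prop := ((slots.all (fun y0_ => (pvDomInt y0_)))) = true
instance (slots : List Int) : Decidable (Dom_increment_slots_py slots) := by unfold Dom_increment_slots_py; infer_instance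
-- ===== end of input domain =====

-- B replaces A's staged passes (comprehensions, max(), slice sum) by a single
-- right-to-left scan with running one/zero counters; same results on Pre_ (proved below).

-- ===== PORT A =====
-- [p for (p,v) in enumerate(slots) if v == 0]
def pvZerosA (slots : List Int) : List Int :=
  (PySem.List.enumerate slots).filterMap (fun pv => if pv.2 = 0 then some pv.1 else none)

-- [p for (p,v) in enumerate(slots) if v == 1 and p < i0]
def pvCandsA (slots : List Int) (i0 : Int) : List Int :=
  (PySem.List.enumerate slots).filterMap (fun pv => if pv.2 = 1 ∧ pv.1 < i0 then some pv.1 else none)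

-- c1 = sum(slots[i1:]); c0 = len(slots) - i1 - sum(slots[i1:]);
-- slots[:i1] + [0] + [1]*c1 + [0]*(c0-1)   (list-repeat of a negative count is empty, as in Python)
def pvBuildA (slots : List Int) (i1 : Int) : List Int :=
  let c1 : Int := (PySem.List.slice slots (some i1) none).sum
  let c0 : Int := (slots.length : Int) - i1 - (PySem.List.slice slots (some i1) none).sum
  PySem.List.slice slots none (some i1) ++ [0] ++ List.replicate c1.toNat 1 ++ List.replicate (c0 - 1).toNat 0

-- the asserts of A hold on every input admitted by Pre_ and are therefore not modelled;
-- max([]) raises ValueError in Python = the 'none' branch here, excluded by Pre_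
def increment_slots_py (slots : List Int) : Option (List Int) :=
  match PySem.List.max? (pvZerosA slots) (fun x => x) with
  | none => none        -- ValueError, outside Pre_
  | some i0 =>
    match PySem.List.max? (pvCandsA slots i0) (fun x => x) with
    | none => none      -- 'if not candidates: return None'
    | some i1 => some (pvBuildA slots i1)

-- ===== PORT B =====
-- the backward 'for i in range(len(slots)-1, -1, -1)' loop of Source B: rs is the reversed
-- not-yet-visited prefix, so the current v is slots[rest.length] and slots[:i] is the
-- slice up to rest.length; ones/zeros are the running counters (counts, hence Nat).
def pvScanB (slots : List Int) (rs : List Int) (ones zeros : Nat) : Option (List Int) :=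
  match rs with
  | [] => none
  | v :: rest =>
    if v = 1 ∧ 0 < zeros then
      some (PySem.List.slice slots none (some (rest.length : Int)) ++ [0]
            ++ List.replicate (ones + 1) 1 ++ List.replicate (zeros - 1) 0)
    else
      pvScanB slots rest (if v = 1 then ones + 1 else ones)
        (if v = 1 then zeros else if v = 0 then zeros + 1 else zeros)

def increment_slots_py_alt (slots : List Int) : Option (List Int) :=
  if (0 : Int) ∈ slots then    -- 'if 0 not in slots: raise ValueError' = none, outside Pre_
    pvScanB slots slots.reverse 0 0
  else none

-- ===== PRECONDITION & SPEC =====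
-- Pre_ excludes (i) lists without a zero, on which A raises ValueError, and (ii) lists holding
-- a value outside {0,1} to the right of the rightmost movable 1 (a 1 with a 0 somewhere after
-- it), on which A's slice-sum reconstruction raises AssertionError or returns an accidental list.
def Pre_increment_slots_py (slots : List Int) : Prop :=
  (0 : Int) ∈ slots ∧
  ∀ r ∈ PySem.List.enumerate slots, ¬(r.2 = 0 ∨ r.2 = 1) →
    (∃ p ∈ PySem.List.enumerate slots, p.1 < r.1 ∧ p.2 = 1 ∧
        ∃ q ∈ PySem.List.enumerate slots, p.1 < q.1 ∧ q.2 = 0) →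
    ∃ p ∈ PySem.List.enumerate slots, r.1 ≤ p.1 ∧ p.2 = 1 ∧
        ∃ q ∈ PySem.List.enumerate slots, p.1 < q.1 ∧ q.2 = 0
instance (slots : List Int) : Decidable (Pre_increment_slots_py slots) := by
  unfold Pre_increment_slots_py; infer_instance

def pvWitness_increment_slots_py : List Int := [1, 0, 1, 0]

def Spec_increment_slots_py (slots : List Int) (out : Option (List Int)) : Prop := out = increment_slots_py_alt slots
instance (slots : List Int) (out : Option (List Int)) : Decidable (Spec_increment_slots_py slots out) := by unfold Spec_increment_slots_py; infer_instance

-- ===== CLAIM (what is proved, stated in full; the proofs are below) =====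
def Claim_equal_increment_slots_py : Prop := ∀ (slots : List Int), Dom_increment_slots_py slots → Pre_increment_slots_py slots → Spec_increment_slots_py slots (increment_slots_py slots)

-- ===== LEMMAS AND PROOFS =====

-- block returned by B when the pivot is at index i (proof-side name for the scan's output)
def pvBlock (slots : List Int) (i : Nat) : List Int :=
  PySem.List.slice slots none (some (i : Int)) ++ [0]
    ++ List.replicate ((slots.drop (i+1)).count 1 + 1) 1
    ++ List.replicate ((slots.drop (i+1)).count 0 - 1) 0

-- the pivot B's scan stops at: rightmost i < m with slots[i] = 1 and a 0 after it
def pvFindPivot (slots : List Int) : Nat → Option Nat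
  | 0 => none
  | m+1 => if slots.getD m 0 = 1 ∧ 0 < (slots.drop (m+1)).count 0 then some m else pvFindPivot slots m

theorem pv_take_succ_reverse (l : List Int) (m : Nat) (h : m < l.length) :
    (l.take (m+1)).reverse = l[m] :: (l.take m).reverse := by
  rw [List.take_add_one, List.getElem?_eq_getElem h]
  simp

theorem pv_scan_spec (slots : List Int) : ∀ m, m ≤ slots.length →
    pvScanB slots ((slots.take m).reverse) ((slots.drop m).count 1) ((slots.drop m).count 0)
      = (pvFindPivot slots m).map (pvBlock slots) := by
  intro m
  induction m with
  | zero => intro _; simp [pvScanB, pvFindPivot]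
  | succ m ih =>
    intro hm
    have hmlt : m < slots.length := by omega
    rw [pv_take_succ_reverse slots m hmlt]
    have hdrop : slots.drop m = slots[m] :: slots.drop (m+1) :=
      List.drop_eq_getElem_cons hmlt
    have hlen : ((slots.take m).reverse).length = m := by
      simp [List.length_take]; omega
    have hgetD : slots.getD m 0 = slots[m] := List.getD_eq_getElem slots 0 hmlt
    have hg : (slots.getD m 0 = 1 ∧ 0 < (slots.drop (m+1)).count 0)
        ↔ (slots[m] = 1 ∧ 0 < (slots.drop (m+1)).count 0) := by rw [hgetD]
    show pvScanB slots (slots[m] :: (slots.take m).reverse) _ _ = _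
    rw [pvScanB]
    by_cases hc : slots[m] = 1 ∧ 0 < (slots.drop (m+1)).count 0
    · have hfp : pvFindPivot slots (m+1)
          = if slots.getD m 0 = 1 ∧ 0 < (slots.drop (m+1)).count 0 then some m
            else pvFindPivot slots m := rfl
      rw [if_pos hc, hfp, if_pos (hg.mpr hc), Option.map_some]
      unfold pvBlock
      rw [hlen]
    · have hones : (if slots[m] = 1 then (slots.drop (m+1)).count 1 + 1 else (slots.drop (m+1)).count 1)
          = (slots.drop m).count 1 := by
        rw [hdrop, List.count_cons]
        by_cases h1 : slots[m] = 1 <;> simp [h1]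
      have hzeros : (if slots[m] = 1 then (slots.drop (m+1)).count 0
            else if slots[m] = 0 then (slots.drop (m+1)).count 0 + 1 else (slots.drop (m+1)).count 0)
          = (slots.drop m).count 0 := by
        rw [hdrop, List.count_cons]
        by_cases h1 : slots[m] = 1
        · simp [h1]
        · by_cases h0 : slots[m] = 0 <;> simp [h1, h0]
      have hfp : pvFindPivot slots (m+1)
          = if slots.getD m 0 = 1 ∧ 0 < (slots.drop (m+1)).count 0 then some m
            else pvFindPivot slots m := rfl
      rw [if_neg hc, hones, hzeros, ih (by omega), hfp, if_neg (fun hx => hc (hg.mp hx))]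

theorem pv_findPivot_none (slots : List Int) : ∀ m,
    (∀ i, i < m → ¬(slots.getD i 0 = 1 ∧ 0 < (slots.drop (i+1)).count 0)) →
    pvFindPivot slots m = none := by
  intro m
  induction m with
  | zero => intro _; rfl
  | succ m ih =>
    intro h
    unfold pvFindPivot
    rw [if_neg (h m (by omega))]
    exact ih (fun i hi => h i (by omega))

theorem pv_findPivot_some (slots : List Int) (i : Nat)
    (hP : slots.getD i 0 = 1 ∧ 0 < (slots.drop (i+1)).count 0) : ∀ m, i < m →
    (∀ j, i < j → j < m → ¬(slots.getD j 0 = 1 ∧ 0 < (slots.drop (j+1)).count 0)) →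
    pvFindPivot slots m = some i := by
  intro m
  induction m with
  | zero => intro h; omega
  | succ m ih =>
    intro him hmax
    unfold pvFindPivot
    by_cases he : i = m
    · subst he; rw [if_pos hP]
    · rw [if_neg (hmax m (by omega) (by omega))]
      exact ih (by omega) (fun j h1 h2 => hmax j h1 (by omega))

-- a zero after index i ↔ the count of zeros in the tail is positive
theorem pv_count0_drop_pos (slots : List Int) (i : Nat) :
    0 < (slots.drop (i+1)).count 0 ↔ ∃ k : Nat, ∃ _ : k < slots.length, i < k ∧ slots[k] = 0 := by
  rw [List.count_pos_iff, List.mem_iff_getElem]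
  constructor
  · rintro ⟨j, hj, hje⟩
    rw [List.getElem_drop] at hje
    exact ⟨i + 1 + j, by simp [List.length_drop] at hj; omega, by omega, hje⟩
  · rintro ⟨k, hk, hik, hke⟩
    refine ⟨k - (i+1), by simp [List.length_drop]; omega, ?_⟩
    rw [List.getElem_drop]
    have : i + 1 + (k - (i + 1)) = k := by omega
    simp only [this]
    exact hke

-- membership characterisations of A's comprehensions
theorem pv_mem_zeros (slots : List Int) (x : Int) :
    x ∈ pvZerosA slots ↔ ∃ k : Nat, ∃ _ : k < slots.length, x = (k : Int) ∧ slots[k] = 0 := by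
  unfold pvZerosA
  rw [List.mem_filterMap]
  constructor
  · rintro ⟨p, hp, hpx⟩
    obtain ⟨k, hk, rfl⟩ := (PySem.List.mem_enumerate_iff slots 0 p).mp hp
    simp only [zero_add] at hpx
    by_cases hv : slots[k] = 0
    · rw [if_pos hv] at hpx
      exact ⟨k, hk, (Option.some_inj.mp hpx).symm, hv⟩
    · rw [if_neg hv] at hpx; cases hpx
  · rintro ⟨k, hk, rfl, hv⟩
    refine ⟨((0 : Int) + (k : Int), slots[k]), (PySem.List.mem_enumerate_iff slots 0 _).mpr ⟨k, hk, rfl⟩, ?_⟩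
    rw [if_pos hv]; simp

theorem pv_mem_cands (slots : List Int) (i0 x : Int) :
    x ∈ pvCandsA slots i0 ↔ ∃ k : Nat, ∃ _ : k < slots.length, x = (k : Int) ∧ slots[k] = 1 ∧ x < i0 := by
  unfold pvCandsA
  rw [List.mem_filterMap]
  constructor
  · rintro ⟨p, hp, hpx⟩
    obtain ⟨k, hk, rfl⟩ := (PySem.List.mem_enumerate_iff slots 0 p).mp hp
    simp only [zero_add] at hpx
    by_cases hv : slots[k] = 1 ∧ (k : Int) < i0
    · rw [if_pos hv] at hpx
      exact ⟨k, hk, (Option.some_inj.mp hpx).symm, hv.1, (Option.some_inj.mp hpx) ▸ hv.2⟩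
    · rw [if_neg hv] at hpx; cases hpx
  · rintro ⟨k, hk, rfl, hv, hlt⟩
    refine ⟨((0 : Int) + (k : Int), slots[k]), (PySem.List.mem_enumerate_iff slots 0 _).mpr ⟨k, hk, rfl⟩, ?_⟩
    rw [if_pos ⟨hv, by simpa using hlt⟩]; simp

-- on a 0/1 list the sum is the count of ones, and length = #ones + #zeros
theorem pv_sum_eq_count (l : List Int) (h : ∀ x ∈ l, x = 0 ∨ x = 1) :
    l.sum = ((l.count 1 : Nat) : Int) := by
  induction l with
  | nil => simp
  | cons a t ih =>
    rw [List.sum_cons, List.count_cons, ih (fun x hx => h x (by simp [hx]))]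
    rcases h a (by simp) with ha | ha <;> (simp [ha]; try omega)

theorem pv_length_eq_counts (l : List Int) (h : ∀ x ∈ l, x = 0 ∨ x = 1) :
    l.length = l.count 1 + l.count 0 := by
  induction l with
  | nil => rfl
  | cons a t ih =>
    rw [List.length_cons, List.count_cons, List.count_cons, ih (fun x hx => h x (by simp [hx]))]
    rcases h a (by simp) with ha | ha <;> (simp [ha]; try omega)

-- the two constructions of the successor agree at the pivot kp on a 0/1 list
theorem pv_build_eq_block (slots : List Int) (kp : Nat) (hkp : kp < slots.length)
    (h1 : slots[kp] = 1) (hsuf : ∀ x ∈ slots.drop (kp+1), x = 0 ∨ x = 1) :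
    pvBuildA slots (kp : Int) = pvBlock slots kp := by
  have hdrop : slots.drop kp = slots[kp] :: slots.drop (kp+1) := List.drop_eq_getElem_cons hkp
  have hbd : ∀ x ∈ slots.drop kp, x = 0 ∨ x = 1 := by
    intro x hx
    rw [hdrop, List.mem_cons] at hx
    rcases hx with hx | hx
    · exact Or.inr (hx.trans h1)
    · exact hsuf x hx
  have hc1 : (slots.drop kp).count 1 = (slots.drop (kp+1)).count 1 + 1 := by
    rw [hdrop, List.count_cons, h1]; simp
  have hc0 : (slots.drop kp).count 0 = (slots.drop (kp+1)).count 0 := by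
    rw [hdrop, List.count_cons, h1]; simp
  have hL : slots.length - kp = (slots.drop (kp+1)).count 1 + 1 + (slots.drop (kp+1)).count 0 := by
    rw [← hc1, ← hc0, ← pv_length_eq_counts _ hbd, List.length_drop]
  have E1 : ((slots.drop kp).sum).toNat = (slots.drop (kp+1)).count 1 + 1 := by
    rw [pv_sum_eq_count _ hbd, hc1]; simp
  have E2 : ((slots.length : Int) - (kp : Int) - (slots.drop kp).sum - 1).toNat
      = (slots.drop (kp+1)).count 0 - 1 := by
    rw [pv_sum_eq_count _ hbd, hc1]
    omega
  simp only [pvBuildA, pvBlock]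
  rw [PySem.List.slice_from_natCast, E1, E2]

-- ===== VERDICT (by name: the statement is the Claim_ definition above) =====
theorem increment_slots_py_spec : Claim_equal_increment_slots_py := by
  intro slots _ hPre
  obtain ⟨h0mem, hsufp⟩ := hPre
  show increment_slots_py slots = increment_slots_py_alt slots
  -- B's scan, specified: it returns the block at the rightmost pivot (if any)
  have hB : increment_slots_py_alt slots = (pvFindPivot slots slots.length).map (pvBlock slots) := by
    have := pv_scan_spec slots slots.length (le_refl _)
    simpa [increment_slots_py_alt, h0mem, List.take_length, List.drop_length] using this
  -- A's rightmost zero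
  obtain ⟨kz, hkz, hkz0⟩ := List.mem_iff_getElem.mp h0mem
  have hzne : pvZerosA slots ≠ [] :=
    List.ne_nil_of_mem ((pv_mem_zeros slots (kz : Int)).mpr ⟨kz, hkz, rfl, hkz0⟩)
  obtain ⟨i0, hi0⟩ : ∃ i0, PySem.List.max? (pvZerosA slots) (fun x => x) = some i0 := by
    cases h : PySem.List.max? (pvZerosA slots) (fun x => x) with
    | none => exact absurd ((PySem.List.max?_eq_none_iff _ _).mp h) hzne
    | some v => exact ⟨v, rfl⟩
  obtain ⟨k0, hk0n, hk0e, hk0v⟩ := (pv_mem_zeros slots i0).mp (PySem.List.max?_mem hi0)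
  have hi0max : ∀ y ∈ pvZerosA slots, y ≤ i0 := PySem.List.max?_isMax hi0
  cases hcand : PySem.List.max? (pvCandsA slots i0) (fun x => x) with
  | none =>
    -- no candidate for A ⇒ no pivot for B
    have hce : pvCandsA slots i0 = [] := (PySem.List.max?_eq_none_iff _ _).mp hcand
    have hnone : pvFindPivot slots slots.length = none := by
      apply pv_findPivot_none
      intro i hi ⟨hP1, hP0⟩
      rw [List.getD_eq_getElem slots 0 hi] at hP1
      obtain ⟨k, hk, hik, hk0⟩ := (pv_count0_drop_pos slots i).mp hP0
      have hkle : (k : Int) ≤ i0 := hi0max _ ((pv_mem_zeros slots _).mpr ⟨k, hk, rfl, hk0⟩)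
      have : (i : Int) ∈ pvCandsA slots i0 :=
        (pv_mem_cands slots i0 _).mpr ⟨i, hi, rfl, hP1, by omega⟩
      simp [hce] at this
    simp [increment_slots_py, hi0, hcand, hB, hnone]
  | some p =>
    obtain ⟨kp, hkpn, hkpe, hkpv, hkplt⟩ := (pv_mem_cands slots i0 p).mp (PySem.List.max?_mem hcand)
    have hpmax : ∀ y ∈ pvCandsA slots i0, y ≤ p := PySem.List.max?_isMax hcand
    have hkpk0 : kp < k0 := by omega
    -- kp is the rightmost movable 1, so by Pre_ everything to its right is 0 or 1
    have hsuf : ∀ x ∈ slots.drop (kp+1), x = 0 ∨ x = 1 := by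
      have hmem1 : ((kp : Int), slots[kp]) ∈ PySem.List.enumerate slots :=
        (PySem.List.mem_enumerate_iff slots 0 _).mpr ⟨kp, hkpn, by simp⟩
      have hmem0 : ((k0 : Int), slots[k0]) ∈ PySem.List.enumerate slots :=
        (PySem.List.mem_enumerate_iff slots 0 _).mpr ⟨k0, hk0n, by simp⟩
      intro x hx
      by_contra hxb
      rw [List.mem_iff_getElem] at hx
      obtain ⟨j, hj, hje⟩ := hx
      rw [List.getElem_drop] at hje
      have hjlen : kp + 1 + j < slots.length := by simp [List.length_drop] at hj; omega
      have hmemr : ((((kp + 1 + j : Nat)) : Int), slots[kp + 1 + j]) ∈ PySem.List.enumerate slots :=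
        (PySem.List.mem_enumerate_iff slots 0 _).mpr ⟨kp + 1 + j, hjlen, by simp⟩
      obtain ⟨p', hp'mem, hrp, hp1, q', hq'mem, hpq, hq0⟩ :=
        hsufp _ hmemr (by simpa [hje] using hxb)
          ⟨_, hmem1, by simp; omega, hkpv, _, hmem0, by simp; omega, hk0v⟩
      obtain ⟨k', hk'n, hp'e⟩ := (PySem.List.mem_enumerate_iff slots 0 p').mp hp'mem
      obtain ⟨kq, hkqn, hq'e⟩ := (PySem.List.mem_enumerate_iff slots 0 q').mp hq'mem
      subst hp'e; subst hq'e
      simp only [zero_add] at hrp hp1 hpq hq0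
      -- the movable 1 at k' is a candidate of A, hence ≤ kp; but it lies at or after kp+1+j
      have hkqz : ((kq : Int)) ≤ i0 :=
        hi0max _ ((pv_mem_zeros slots _).mpr ⟨kq, hkqn, rfl, hq0⟩)
      have : ((k' : Int)) ≤ p :=
        hpmax _ ((pv_mem_cands slots i0 _).mpr ⟨k', hk'n, rfl, hp1, by omega⟩)
      omega
    -- B's scan stops exactly at kp
    have hfind : pvFindPivot slots slots.length = some kp := by
      apply pv_findPivot_some slots kp
        ⟨by rw [List.getD_eq_getElem slots 0 hkpn]; exact hkpv,
         (pv_count0_drop_pos slots kp).mpr ⟨k0, hk0n, hkpk0, hk0v⟩⟩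
        slots.length hkpn
      intro j h1 h2 ⟨hP1, hP0⟩
      rw [List.getD_eq_getElem slots 0 h2] at hP1
      obtain ⟨k, hk, hjk, hkz'⟩ := (pv_count0_drop_pos slots j).mp hP0
      have hkle : (k : Int) ≤ i0 := hi0max _ ((pv_mem_zeros slots _).mpr ⟨k, hk, rfl, hkz'⟩)
      have : (j : Int) ≤ p := hpmax _ ((pv_mem_cands slots i0 _).mpr ⟨j, h2, rfl, hP1, by omega⟩)
      omega
    simp only [increment_slots_py, hi0, hcand, hB, hfind, Option.map_some]
    rw [hkpe]
    exact congrArg some (pv_build_eq_block slots kp hkpn (by simpa [hkpe] using hkpv) hsuf)
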